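-- pv_equiv track=rewrite | github.com/tanishqsujan/String-II | changethecase.py | change_the_case
-- ===== SOURCE A (Python) =====
-- def change_the_case(s):
--     result = ""
--
--     for i in s:
--         #changing from lower to upper case
--         if i.islower():
--             result = result + i.upper()
--         #change from upper to lower case
--         if i.isupper():
--             result = result + i.lower()
--
--     return result
-- ===== SOURCE B (Python) =====
-- def change_the_case(s):
--     # Table-driven: one precomputed ASCII translation table (letters map to the
--     # opposite case, everything else maps to None = deleted), applied by str.translate.
--     table = {code: None for code in range(128)}
--     for code in range(ord('a'), ord('z') + 1):
--         table[code] = code - 32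
--     for code in range(ord('A'), ord('Z') + 1):
--         table[code] = code + 32
--     return s.translate(table)
-- ===== Notes on version B (the rewrite author's own statement) =====
-- stated objective: faster
-- what changed: Replaces A's per-character branching filter-and-concatenate loop (quadratic repeated string concatenation) by a precomputed ASCII translation table (letters mapped to the opposite case, all other codes to None) applied in one C-level str.translate call.
import Mathlib
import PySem

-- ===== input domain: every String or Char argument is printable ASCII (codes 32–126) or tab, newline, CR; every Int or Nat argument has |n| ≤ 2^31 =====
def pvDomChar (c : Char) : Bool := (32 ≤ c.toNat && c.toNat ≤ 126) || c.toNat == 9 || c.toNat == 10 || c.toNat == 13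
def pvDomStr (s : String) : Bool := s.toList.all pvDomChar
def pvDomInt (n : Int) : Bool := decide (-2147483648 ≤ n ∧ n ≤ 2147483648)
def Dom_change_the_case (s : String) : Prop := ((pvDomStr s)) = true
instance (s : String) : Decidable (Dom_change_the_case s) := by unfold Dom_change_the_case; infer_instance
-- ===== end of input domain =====

-- B replaces A's branching filter-and-concatenate loop by a precomputed ASCII translation
-- table applied with str.translate (table-driven, no per-character branching).

-- ===== PORT A =====
-- A: loop over characters, appending i.upper() when islower and i.lower() when isupper.
def change_the_case (s : String) : String :=
  String.mk (s.toList.foldl (fun result i =>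
    let r1 := if PySem.Chars.islower i then result ++ [PySem.Chars.upperChar i] else result
    if PySem.Chars.isupper i then r1 ++ [PySem.Chars.lowerChar i] else r1) [])

-- ===== PORT B =====
-- Source B builds {code: None for code in range(128)} then overwrites the two letter ranges;
-- ported as a PySem.Dict with Int keys (Python ints) and Option Int values (None/int).
def pvTable : PySem.Dict Int (Option Int) :=
  let t0 := (PySem.List.pyRange 0 128 1).foldl (fun d code => d.insert code none) PySem.Dict.empty
  let t1 := (PySem.List.pyRange 97 123 1).foldl (fun d code => d.insert code (some (code - 32))) t0
  (PySem.List.pyRange 65 91 1).foldl (fun d code => d.insert code (some (code + 32))) t1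

-- str.translate has no PySem primitive; ported by hand per character, exactly Python's rule:
-- key absent → keep the character, mapped to None → delete it, mapped to an int → chr(int).
def pvTranslateChar (t : PySem.Dict Int (Option Int)) (c : Char) : List Char :=
  match t.get? (c.toNat : Int) with
  | none => [c]
  | some none => []
  | some (some m) => [Char.ofNat m.toNat]

def change_the_case_alt (s : String) : String :=
  String.mk (s.toList.flatMap (pvTranslateChar pvTable))

-- ===== PRECONDITION & SPEC =====
def Spec_change_the_case (s : String) (out : String) : Prop := out = change_the_case_alt s
instance (s : String) (out : String) : Decidable (Spec_change_the_case s out) := by unfold Spec_change_the_case; infer_instance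

-- ===== CLAIM (what is proved, stated in full; the proofs are below) =====
def Claim_equal_change_the_case : Prop := ∀ (s : String), Dom_change_the_case s → Spec_change_the_case s (change_the_case s)

-- ===== LEMMAS AND PROOFS =====

-- A's per-character contribution, as a list.
def pvStepA (c : Char) : List Char :=
  (if PySem.Chars.islower c then [PySem.Chars.upperChar c] else []) ++
  (if PySem.Chars.isupper c then [PySem.Chars.lowerChar c] else [])

theorem pv_islower_iff (c : Char) : PySem.Chars.islower c = true ↔ (97 ≤ c.toNat ∧ c.toNat ≤ 122) := by
  unfold PySem.Chars.islower
  simp only [Bool.and_eq_true, decide_eq_true_eq, Char.le_def, UInt32.le_iff_toNat_le]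
  have ha : ('a'.val).toNat = 97 := rfl
  have hz : ('z'.val).toNat = 122 := rfl
  rw [ha, hz]
  exact Iff.rfl

theorem pv_isupper_iff (c : Char) : PySem.Chars.isupper c = true ↔ (65 ≤ c.toNat ∧ c.toNat ≤ 90) := by
  unfold PySem.Chars.isupper
  simp only [Bool.and_eq_true, decide_eq_true_eq, Char.le_def, UInt32.le_iff_toNat_le]
  have ha : ('A'.val).toNat = 65 := rfl
  have hz : ('Z'.val).toNat = 90 := rfl
  rw [ha, hz]
  exact Iff.rfl

-- Closed form of the table lookup, checked by computation over all 128 codes.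
set_option maxRecDepth 10000 in
theorem pv_table_all : ((List.range 128).all (fun n =>
    pvTable.get? (n : Int) == some (
      if 97 ≤ n ∧ n ≤ 122 then some ((n : Int) - 32)
      else if 65 ≤ n ∧ n ≤ 90 then some ((n : Int) + 32)
      else none))) = true := by decide

theorem pv_table_get (n : Nat) (h : n < 128) :
    pvTable.get? (n : Int) = some (
      if 97 ≤ n ∧ n ≤ 122 then some ((n : Int) - 32)
      else if 65 ≤ n ∧ n ≤ 90 then some ((n : Int) + 32)
      else none) := by
  have hall := pv_table_all
  rw [List.all_eq_true] at hall
  have := hall n (List.mem_range.mpr h)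
  simpa using this

theorem pv_step_eq (c : Char) (hdom : pvDomChar c = true) :
    pvTranslateChar pvTable c = pvStepA c := by
  have hlt : c.toNat < 128 := by
    unfold pvDomChar at hdom
    simp only [Bool.or_eq_true, Bool.and_eq_true, decide_eq_true_eq, beq_iff_eq] at hdom
    omega
  unfold pvTranslateChar pvStepA
  rw [pv_table_get c.toNat hlt]
  by_cases hl : 97 ≤ c.toNat ∧ c.toNat ≤ 122
  · have hlow : PySem.Chars.islower c = true := (pv_islower_iff c).mpr hl
    have hupp : PySem.Chars.isupper c = false := by
      rw [← Bool.not_eq_true, pv_isupper_iff]; omega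
    have h32 : ((c.toNat : Int) - 32).toNat = c.toNat - 32 := by omega
    simp [hl, hlow, hupp, h32, PySem.Chars.upperChar]
  · by_cases hu : 65 ≤ c.toNat ∧ c.toNat ≤ 90
    · have hupp : PySem.Chars.isupper c = true := (pv_isupper_iff c).mpr hu
      have hlow : PySem.Chars.islower c = false := by
        rw [← Bool.not_eq_true, pv_islower_iff]; omega
      have h32 : ((c.toNat : Int) + 32).toNat = c.toNat + 32 := by omega
      simp [hl, hu, hlow, hupp, h32, PySem.Chars.lowerChar]
    · have hlow : PySem.Chars.islower c = false := by
        rw [← Bool.not_eq_true, pv_islower_iff]; omega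
      have hupp : PySem.Chars.isupper c = false := by
        rw [← Bool.not_eq_true, pv_isupper_iff]; omega
      simp [hl, hu, hlow, hupp]

theorem pv_foldA (l : List Char) (acc : List Char) :
    l.foldl (fun result i =>
      let r1 := if PySem.Chars.islower i then result ++ [PySem.Chars.upperChar i] else result
      if PySem.Chars.isupper i then r1 ++ [PySem.Chars.lowerChar i] else r1) acc
    = acc ++ l.flatMap pvStepA := by
  induction l generalizing acc with
  | nil => simp
  | cons c l ih =>
    simp only [List.foldl_cons, List.flatMap_cons, ih]
    unfold pvStepA
    split_ifs <;> simp

theorem pv_flatMap_eq (l : List Char) (hdom : l.all pvDomChar = true) :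
    l.flatMap pvStepA = l.flatMap (pvTranslateChar pvTable) := by
  induction l with
  | nil => simp
  | cons c l ih =>
    simp only [List.all_cons, Bool.and_eq_true] at hdom
    simp only [List.flatMap_cons, pv_step_eq c hdom.1, ih hdom.2]

-- ===== VERDICT (by name: the statement is the Claim_ definition above) =====
set_option maxRecDepth 10000 in
theorem change_the_case_spec : Claim_equal_change_the_case := by
  intro s hdom
  unfold Spec_change_the_case change_the_case change_the_case_alt
  rw [pv_foldA, List.nil_append, pv_flatMap_eq s.toList hdom]
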